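-- pv_equiv track=rewrite | github.com/FlaBBB/Cybers_security | CTF/2024/Netcomp-CTF/Warmups/Reverse/Reverse/chall.py | check_flag
-- ===== SOURCE A (Python) =====
-- def check_flag(flag):
-- 	enc_flag = [110, 102, 118, 102, 115, 114, 118, 130, 103, 104, 92, 80, 98, 108, 63, 63, 65, 112, 113, 144]
--
-- 	if len(flag) != len(enc_flag):
-- 		return False
--
-- 	for i,j in enumerate(flag):
-- 		if ord(j)+i != enc_flag[i]:
-- 			return False
--
-- 	return True
-- ===== SOURCE B (Python) =====
-- def check_flag(flag):
--     enc_flag = [110, 102, 118, 102, 115, 114, 118, 130, 103, 104, 92, 80, 98, 108, 63, 63, 65, 112, 113, 144]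
--     expected = ''.join(chr(c - i) for i, c in enumerate(enc_flag))
--     return flag == expected
-- ===== Notes on version B (the rewrite author's own statement) =====
-- stated objective: simpler
-- what changed: B decodes the constant array once into the expected plaintext and returns a single string equality, instead of A's length guard plus index-arithmetic loop with early exit.
import Mathlib
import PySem

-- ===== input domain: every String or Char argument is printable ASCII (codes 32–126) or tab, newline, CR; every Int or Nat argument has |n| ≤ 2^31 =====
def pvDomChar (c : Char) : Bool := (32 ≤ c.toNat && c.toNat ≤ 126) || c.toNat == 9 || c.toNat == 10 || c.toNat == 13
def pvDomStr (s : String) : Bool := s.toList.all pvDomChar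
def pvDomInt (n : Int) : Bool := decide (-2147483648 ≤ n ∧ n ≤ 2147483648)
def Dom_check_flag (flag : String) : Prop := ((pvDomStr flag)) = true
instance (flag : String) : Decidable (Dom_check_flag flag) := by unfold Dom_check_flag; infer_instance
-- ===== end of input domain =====

-- B decodes the constant array once into the expected plaintext and returns one string
-- equality, instead of A's length guard plus per-index arithmetic loop (objective: simpler).

-- ===== PORT A =====
def encA : List Int := [110, 102, 118, 102, 115, 114, 118, 130, 103, 104, 92, 80, 98, 108, 63, 63, 65, 112, 113, 144]

-- A's for-loop over enumerate(flag) with early 'return False'; i is the enumerate index.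
-- 'enc_flag[i]' is PySem.List.pyGet?; its none (IndexError) branch is unreachable because
-- the length guard runs first (none ≠ some _ makes the condition true, matching no return).
def chkA : List Char → Nat → Bool
  | [], _ => true
  | j :: rest, i =>
      if some ((j.toNat : Int) + i) ≠ PySem.List.pyGet? encA (i : Int) then false
      else chkA rest (i + 1)

def check_flag (flag : String) : Bool :=
  if (PySem.Str.len flag) ≠ (encA.length : Int) then false
  else chkA flag.toList 0

-- ===== PORT B =====
def encB : List Int := [110, 102, 118, 102, 115, 114, 118, 130, 103, 104, 92, 80, 98, 108, 63, 63, 65, 112, 113, 144]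

def check_flag_alt (flag : String) : Bool :=
  let expected : String := String.ofList ((PySem.List.enumerate encB).map (fun p => Char.ofNat (p.2 - p.1).toNat))
  flag == expected

-- ===== PRECONDITION & SPEC =====
def Spec_check_flag (flag : String) (out : Bool) : Prop := out = check_flag_alt flag
instance (flag : String) (out : Bool) : Decidable (Spec_check_flag flag out) := by unfold Spec_check_flag; infer_instance

-- ===== CLAIM (what is proved, stated in full; the proofs are below) =====
def Claim_equal_check_flag : Prop := ∀ (flag : String), Dom_check_flag flag → Spec_check_flag flag (check_flag flag)

-- ===== LEMMAS AND PROOFS =====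

-- the decoded plaintext
def EL : List Char := ['n','e','t','c','o','m','p','{','_','_','R','E','V','_','1','0','1','_','_','}']

theorem char_toNat_inj {c d : Char} (h : c.toNat = d.toNat) : c = d :=
  Char.ext (by simpa [Char.toNat] using UInt32.toNat_inj.mp h)

-- per-index relation between the encoded constant and the plaintext
theorem enc_key : ∀ i < 20, encA.getD i 0 = ((EL.getD i ' ').toNat : Int) + i := by
  intro i hi; interval_cases i <;> rfl

theorem chkA_iff : ∀ (l : List Char) (i : Nat), l.length + i = 20 →
    (chkA l i = true ↔ l = EL.drop i) := by
  intro l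
  induction l with
  | nil =>
      intro i h
      simp only [List.length_nil, Nat.zero_add] at h
      subst h
      simp [chkA, EL]
  | cons c r ih =>
      intro i h
      have hi : i < 20 := by simp at h; omega
      have hr : r.length + (i + 1) = 20 := by simp at h ⊢; omega
      have hiE : i < EL.length := by simp [EL]; omega
      have hget : PySem.List.pyGet? encA (i : Int) = some (encA.getD i 0) := by
        rw [PySem.List.pyGet?_natCast]
        rw [List.getElem?_eq_getElem (by simpa [encA] using hi)]
        rw [List.getD_eq_getElem _ _ (by simpa [encA] using hi)]
      have hdrop : EL.drop i = EL.getD i ' ' :: EL.drop (i + 1) := by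
        rw [List.getD_eq_getElem _ _ hiE]
        exact List.drop_eq_getElem_cons hiE
      rw [hdrop]
      rw [show chkA (c :: r) i = if some ((c.toNat : Int) + i) ≠ PySem.List.pyGet? encA (i : Int) then false else chkA r (i + 1) from rfl]
      rw [hget]
      by_cases hc : ((c.toNat : Int) + i) = encA.getD i 0
      · have hceq : c = EL.getD i ' ' := by
          apply char_toNat_inj
          have := enc_key i hi
          omega
        rw [if_neg (by simp [hc])]
        rw [ih (i + 1) hr]
        simp [hceq]
      · rw [if_pos (by simpa using hc)]
        constructor
        · intro h'; exact absurd h' (by simp)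
        · intro h'
          have hch : c = EL.getD i ' ' := (List.cons_eq_cons.mp h').1
          exfalso
          apply hc
          have := enc_key i hi
          rw [hch]
          omega

theorem alt_eq (flag : String) : check_flag_alt flag = (flag == "netcomp{__REV_101__}") := by
  unfold check_flag_alt
  congr 1

theorem beq_toList (flag : String) :
    (flag == "netcomp{__REV_101__}") = decide (flag.toList = EL) := by
  by_cases h : flag.toList = EL
  · have hfe : flag = "netcomp{__REV_101__}" := String.toList_inj.mp (by rw [h]; decide)
    simp [hfe, EL]
  · have hne : flag ≠ "netcomp{__REV_101__}" := by
      intro hh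
      exact h (by rw [hh]; decide)
    simp [hne, h]

-- ===== VERDICT (by name: the statement is the Claim_ definition above) =====
theorem check_flag_spec : Claim_equal_check_flag := by
  intro flag _
  unfold Spec_check_flag
  rw [alt_eq, beq_toList]
  unfold check_flag
  by_cases h : (PySem.Str.len flag) = (encA.length : Int)
  · rw [if_neg (by simpa using h)]
    have hlen : flag.toList.length = 20 := by
      have h' := h
      simp [PySem.Str.len, encA] at h'
      exact_mod_cast h'
    have hiff := chkA_iff flag.toList 0 (by omega)
    simp only [List.drop_zero] at hiff
    by_cases hb : chkA flag.toList 0 = true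
    · rw [hb]
      simp [hiff.mp hb]
    · rw [Bool.eq_false_iff.mpr hb]
      have hne : ¬ flag.toList = EL := fun hh => hb (hiff.mpr hh)
      simp [hne]
  · rw [if_pos (by simpa using h)]
    have hne : flag.toList ≠ EL := by
      intro hh
      apply h
      simp [PySem.Str.len, hh, EL, encA]
    simp [hne]
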